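-- pv_equiv track=rewrite | github.com/TobiasLee/ChineseNER | cluener_bio/ner.py | __paser_ner
-- ===== SOURCE A (Python) =====
-- def __paser_ner(ner_data):
--     # 数据还原成NER数组，字数组，标签数组
--     sentence_arr = []
--     label_arr = []
--     for i in range(len(ner_data)):
--         # if len(ner_data[i][1]) == 1 and ner_data[i][0] != 'O':  # for S
--         #     label_arr.append('S-' + ner_data[i][0])
--         #     sentence_arr.append(ner_data[i][1])
--         #     continue
--         for j in range(len(ner_data[i][1])):
--             if ner_data[i][0] == 'O':
--                 label_arr.append(ner_data[i][0])
--             else: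
--                 if j == 0:
--                     label_arr.append('B-' + ner_data[i][0])
--                 else:
--                     label_arr.append('I-' + ner_data[i][0])
--             sentence_arr.append(ner_data[i][1][j])
--     return sentence_arr, label_arr
-- ===== SOURCE B (Python) =====
-- def __paser_ner(ner_data):
--     # Divide-and-conquer: split the span list in half, solve each half, concatenate.
--     def _labels(tag, s):
--         if tag == 'O':
--             return ['O'] * len(s)
--         if not s:
--             return []
--         return ['B-' + tag] + ['I-' + tag] * (len(s) - 1)
--
--     def _go(lo, hi):
--         if hi - lo == 0:
--             return [], []
--         if hi - lo == 1:
--             tag, s = ner_data[lo]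
--             return list(s), _labels(tag, s)
--         mid = (lo + hi) // 2
--         lsent, llab = _go(lo, mid)
--         rsent, rlab = _go(mid, hi)
--         return lsent + rsent, llab + rlab
--
--     return _go(0, len(ner_data))
-- ===== Notes on version B (the rewrite author's own statement) =====
-- stated objective: alternative
-- what changed: B replaces A's sequential double loop with a divide-and-conquer recursion: it splits the span list in half, solves each half recursively (a leaf builds its label chunk in closed form instead of a per-character j==0 branch), and concatenates the two results.
import Mathlib
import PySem

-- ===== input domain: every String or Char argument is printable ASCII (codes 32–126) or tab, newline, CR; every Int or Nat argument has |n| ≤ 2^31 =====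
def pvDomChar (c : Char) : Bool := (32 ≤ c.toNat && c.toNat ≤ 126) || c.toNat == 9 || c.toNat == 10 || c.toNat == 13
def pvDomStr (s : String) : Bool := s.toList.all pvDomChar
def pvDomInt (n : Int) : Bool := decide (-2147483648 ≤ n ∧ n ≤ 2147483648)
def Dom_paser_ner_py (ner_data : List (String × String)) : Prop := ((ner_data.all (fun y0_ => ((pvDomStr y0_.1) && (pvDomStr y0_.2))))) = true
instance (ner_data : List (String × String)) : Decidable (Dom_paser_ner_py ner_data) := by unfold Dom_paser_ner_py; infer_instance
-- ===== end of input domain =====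

-- B replaces A's sequential double loop with divide-and-conquer over the span list
-- (alternative decomposition; return values proved equal on the whole domain).


-- ===== PORT A =====
-- A: index loop over the spans; inner per-character loop appending one label and one
-- 1-char string per character, with a j==0 branch for the B-/I- distinction.
def paser_ner_py (ner_data : List (String × String)) : List String × List String :=
  ner_data.foldl
    (fun acc p =>
      (PySem.List.enumerate p.2.toList 0).foldl
        (fun acc2 jc =>
          let lab :=
            if p.1 == "O" then p.1
            else if jc.1 == 0 then "B-" ++ p.1 else "I-" ++ p.1
          (acc2.1 ++ [String.ofList [jc.2]], acc2.2 ++ [lab]))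
        acc)
    ([], [])

-- ===== PORT B =====
-- B: the labels of one span, built in closed form (no per-character branch).
def pvLabsB (tag s : String) : List String :=
  let cs := s.toList
  if tag == "O" then List.replicate cs.length "O"
  else if cs = [] then []
  else ("B-" ++ tag) :: List.replicate (cs.length - 1) ("I-" ++ tag)

-- B: divide and conquer on the index interval [lo, hi): split at the midpoint,
-- solve each half recursively, concatenate the two results.
def pvGoB (nd : List (String × String)) (lo hi : Nat) : List String × List String :=
  if hi - lo = 0 then ([], [])
  else if hi - lo = 1 then
    let p := nd[lo]?.getD ("", "")
    (p.2.toList.map (fun c => String.ofList [c]), pvLabsB p.1 p.2)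
  else
    let mid := (lo + hi) / 2
    let lres := pvGoB nd lo mid
    let rres := pvGoB nd mid hi
    (lres.1 ++ rres.1, lres.2 ++ rres.2)
termination_by hi - lo
decreasing_by all_goals omega

def paser_ner_py_alt (ner_data : List (String × String)) : List String × List String :=
  pvGoB ner_data 0 ner_data.length

-- ===== PRECONDITION & SPEC =====
def Spec_paser_ner_py (ner_data : List (String × String)) (out : List String × List String) : Prop := out = paser_ner_py_alt ner_data
instance (ner_data : List (String × String)) (out : List String × List String) : Decidable (Spec_paser_ner_py ner_data out) := by unfold Spec_paser_ner_py; infer_instance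

-- ===== CLAIM (what is proved, stated in full; the proofs are below) =====
def Claim_equal_paser_ner_py : Prop := ∀ (ner_data : List (String × String)), Dom_paser_ner_py ner_data → Spec_paser_ner_py ner_data (paser_ner_py ner_data)

-- ===== LEMMAS AND PROOFS =====

-- Common characterisation both ports are reduced to: per-span flatMap of the
-- characters (as 1-char strings) and of the closed-form label chunk.
def pvSpecPair (nd : List (String × String)) : List String × List String :=
  (nd.flatMap (fun p => p.2.toList.map (fun c => String.ofList [c])),
   nd.flatMap (fun p => pvLabsB p.1 p.2))

-- A's inner loop for tag = "O": one 1-char string and one "O" per character.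
theorem innerA_O (cs : List Char) (s : Int) (acc : List String × List String) :
    (PySem.List.enumerate cs s).foldl
      (fun acc2 (jc : Int × Char) => (acc2.1 ++ [String.ofList [jc.2]], acc2.2 ++ ["O"])) acc
    = (acc.1 ++ cs.map (fun c => String.ofList [c]), acc.2 ++ List.replicate cs.length "O") := by
  induction cs generalizing s acc with
  | nil => simp [PySem.List.enumerate_nil]
  | cons c cs ih =>
      rw [PySem.List.enumerate_cons, List.foldl_cons, ih]
      simp [List.replicate_succ, List.append_assoc]

-- A's inner loop on the tail of a non-"O" span (indices start at s ≥ 1): all "I-"+tag.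
theorem innerA_I (tag : String) (cs : List Char) (s : Int) (hs : 1 ≤ s)
    (acc : List String × List String) :
    (PySem.List.enumerate cs s).foldl
      (fun acc2 (jc : Int × Char) =>
        (acc2.1 ++ [String.ofList [jc.2]],
         acc2.2 ++ [if (jc.1 == 0) = true then "B-" ++ tag else "I-" ++ tag])) acc
    = (acc.1 ++ cs.map (fun c => String.ofList [c]),
       acc.2 ++ List.replicate cs.length ("I-" ++ tag)) := by
  induction cs generalizing s acc with
  | nil => simp [PySem.List.enumerate_nil]
  | cons c cs ih =>
      rw [PySem.List.enumerate_cons, List.foldl_cons]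
      rw [if_neg (by simpa using (by omega : s ≠ 0))]
      rw [ih (s + 1) (by omega)]
      simp [List.replicate_succ, List.append_assoc]

-- A's inner per-character loop over one span equals a closed-form extension.
theorem step_eq (p : String × String) (acc : List String × List String) :
    (PySem.List.enumerate p.2.toList 0).foldl
      (fun acc2 (jc : Int × Char) =>
        let lab := if p.1 == "O" then p.1
          else if jc.1 == 0 then "B-" ++ p.1 else "I-" ++ p.1
        (acc2.1 ++ [String.ofList [jc.2]], acc2.2 ++ [lab]))
      acc
    = (acc.1 ++ p.2.toList.map (fun c => String.ofList [c]), acc.2 ++ pvLabsB p.1 p.2) := by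
  obtain ⟨tag, s⟩ := p
  simp only [pvLabsB]
  cases hcs : s.toList with
  | nil =>
      by_cases ho : (tag == "O") = true <;>
        simp [PySem.List.enumerate_nil, ho]
  | cons c cs =>
      by_cases ho : (tag == "O") = true
      · have htag : tag = "O" := by simpa using ho
        subst htag
        simp only [beq_self_eq_true, if_true]
        rw [innerA_O (c :: cs) 0 acc]
      · rw [Bool.not_eq_true] at ho
        simp only [ho, Bool.false_eq_true, if_false, List.cons_ne_nil]
        rw [PySem.List.enumerate_cons, List.foldl_cons]
        rw [if_pos (by decide : ((0 : Int) == 0) = true)]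
        rw [show (0 : Int) + 1 = 1 from by norm_num, innerA_I tag cs 1 le_rfl]
        simp [List.append_assoc]

-- A's fold, with the accumulator generalized, equals the characterisation.
theorem foldA_eq (nd : List (String × String)) (acc : List String × List String) :
    nd.foldl
      (fun acc p =>
        (PySem.List.enumerate p.2.toList 0).foldl
          (fun acc2 (jc : Int × Char) =>
            let lab := if p.1 == "O" then p.1
              else if jc.1 == 0 then "B-" ++ p.1 else "I-" ++ p.1
            (acc2.1 ++ [String.ofList [jc.2]], acc2.2 ++ [lab]))
          acc)
      acc
    = (acc.1 ++ (pvSpecPair nd).1, acc.2 ++ (pvSpecPair nd).2) := by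
  induction nd generalizing acc with
  | nil => simp [pvSpecPair]
  | cons p nd ih =>
      rw [List.foldl_cons, step_eq, ih]
      simp [pvSpecPair, List.append_assoc]

-- B's divide-and-conquer on [lo, hi) equals the characterisation of that slice.
theorem goB_eq (nd : List (String × String)) :
    ∀ n lo hi, hi - lo = n → hi ≤ nd.length →
      pvGoB nd lo hi = pvSpecPair ((nd.drop lo).take (hi - lo)) := by
  intro n
  induction n using Nat.strong_induction_on with
  | _ n ih =>
    intro lo hi hn hlen
    rw [pvGoB]
    by_cases h0 : hi - lo = 0
    · simp [h0, pvSpecPair]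
    · rw [if_neg h0]
      by_cases h1 : hi - lo = 1
      · rw [if_pos h1]
        have hlo : lo < nd.length := by omega
        have hdrop : nd.drop lo = nd[lo] :: nd.drop (lo + 1) :=
          List.drop_eq_getElem_cons hlo
        rw [h1, hdrop]
        simp only [List.take_succ_cons, List.take_zero]
        simp [pvSpecPair, List.getElem?_eq_getElem hlo]
      · rw [if_neg h1]
        have hmidl : ((lo + hi) / 2) - lo < n := by omega
        have hmidr : hi - ((lo + hi) / 2) < n := by omega
        simp only [ih _ hmidl lo ((lo + hi) / 2) rfl (by omega),
          ih _ hmidr ((lo + hi) / 2) hi rfl hlen]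
        have hsplit : (nd.drop lo).take (hi - lo)
            = (nd.drop lo).take ((lo + hi) / 2 - lo)
              ++ (nd.drop ((lo + hi) / 2)).take (hi - (lo + hi) / 2) := by
          have h2 : hi - lo = ((lo + hi) / 2 - lo) + (hi - (lo + hi) / 2) := by omega
          rw [h2, List.take_add, List.drop_drop]
          have h3 : lo + ((lo + hi) / 2 - lo) = (lo + hi) / 2 := by omega
          rw [h3]
        rw [hsplit]
        simp [pvSpecPair]

theorem ports_eq (nd : List (String × String)) :
    paser_ner_py nd = paser_ner_py_alt nd := by
  unfold paser_ner_py paser_ner_py_alt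
  rw [foldA_eq, goB_eq nd (nd.length - 0) 0 nd.length rfl le_rfl]
  simp [pvSpecPair]

-- ===== VERDICT (by name: the statement is the Claim_ definition above) =====
theorem paser_ner_py_spec : Claim_equal_paser_ner_py := by
  intro nd _
  unfold Spec_paser_ner_py
  exact ports_eq nd
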